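-- pv_equiv track=rewrite | github.com/bastidas/Acinonyx | pylink_tools/mechanism.py | _connected_component_containing
-- ===== SOURCE A (Python) =====
-- def _connected_component_containing(
--     neighbors: dict[str, set[str]],
--     start: str,
--     exclude_edge: tuple[str, str] | None = None,
-- ) -> set[str]:
--     """BFS from start; optionally do not traverse exclude_edge (a, b) (order ignored)."""
--     a_ex, b_ex = (exclude_edge[0], exclude_edge[1]) if exclude_edge else (None, None)
--     component: set[str] = set()
--     stack = [start]
--     while stack:
--         node = stack.pop()
--         if node in component:
--             continue
--         component.add(node)
--         for nbr in neighbors.get(node, set()):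
--             if nbr in component:
--                 continue
--             if exclude_edge and (node == a_ex and nbr == b_ex or node == b_ex and nbr == a_ex):
--                 continue
--             stack.append(nbr)
--     return component
-- ===== SOURCE B (Python) =====
-- def _connected_component_containing(
--     neighbors: dict[str, set[str]],
--     start: str,
--     exclude_edge: tuple[str, str] | None = None,
-- ) -> set[str]:
--     """Level-by-level BFS with set-valued frontiers; optionally do not traverse exclude_edge (order ignored)."""
--     a_ex, b_ex = (exclude_edge[0], exclude_edge[1]) if exclude_edge else (None, None)
--     component: set[str] = set()
--     frontier: set[str] = {start}
--     while frontier: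
--         component |= frontier
--         next_frontier: set[str] = set()
--         for node in frontier:
--             for nbr in neighbors.get(node, set()):
--                 if nbr in component:
--                     continue
--                 if exclude_edge and (node == a_ex and nbr == b_ex or node == b_ex and nbr == a_ex):
--                     continue
--                 next_frontier.add(nbr)
--         frontier = next_frontier
--     return component
-- ===== Notes on version B (the rewrite author's own statement) =====
-- stated objective: alternative
-- what changed: Replaces the explicit stack with per-pop already-visited re-checks by a level-by-level BFS over set-valued frontiers: component absorbs the whole frontier at once and the next frontier is built from not-yet-visited, non-excluded neighbors of the current layer.
import Mathlib
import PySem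

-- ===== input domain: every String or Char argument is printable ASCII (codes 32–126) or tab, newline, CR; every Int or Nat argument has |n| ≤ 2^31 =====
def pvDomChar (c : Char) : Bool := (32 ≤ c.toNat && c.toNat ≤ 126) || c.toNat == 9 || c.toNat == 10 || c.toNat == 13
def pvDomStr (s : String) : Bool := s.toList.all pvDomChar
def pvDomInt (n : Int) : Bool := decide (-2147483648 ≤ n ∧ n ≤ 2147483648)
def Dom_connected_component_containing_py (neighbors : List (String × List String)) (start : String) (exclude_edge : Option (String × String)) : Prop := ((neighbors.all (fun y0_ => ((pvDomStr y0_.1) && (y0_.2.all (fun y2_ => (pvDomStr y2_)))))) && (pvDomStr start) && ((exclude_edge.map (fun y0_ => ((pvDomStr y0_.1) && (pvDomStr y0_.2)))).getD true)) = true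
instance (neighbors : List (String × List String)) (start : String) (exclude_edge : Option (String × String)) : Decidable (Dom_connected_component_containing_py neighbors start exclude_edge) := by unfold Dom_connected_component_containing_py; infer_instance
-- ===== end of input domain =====

-- B replaces A's explicit DFS stack (with per-pop visited re-checks) by a level-by-level BFS over
-- set-valued frontiers; same component set. Python returns a set[str] (no defined element order),
-- so BOTH ports return its elements as the canonical sorted list; the fuel arguments are totality
-- guards only (proved sufficient below).

-- ===== PORT A =====
-- the order-ignoring exclude-edge test (shared verbatim by both Pythons)
def pvExcl (exclude_edge : Option (String × String)) (node nbr : String) : Bool :=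
  match exclude_edge with
  | none => false
  | some (a_ex, b_ex) => (node == a_ex && nbr == b_ex) || (node == b_ex && nbr == a_ex)

-- neighbors.get(node, set())  (dict lookup; shared by both ports)
def pvAdj (neighbors : List (String × List String)) (node : String) : List String :=
  (PySem.Dict.ofList neighbors).getD node []

-- totality fuel: one loop iteration per stack pop / BFS round; bounded via the adjacency sizes
def pvFuel (neighbors : List (String × List String)) : Nat :=
  (((PySem.Dict.ofList neighbors).items).map (fun p => p.2.length)).sum + 1

-- A's while loop: pop the top of the stack (list head here), skip visited nodes, push unvisited,
-- non-excluded neighbors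
def pvLoopA (neighbors : List (String × List String)) (exclude_edge : Option (String × String)) :
    Nat → List String → PySem.Set String → PySem.Set String
  | 0, _, comp => comp
  | _ + 1, [], comp => comp
  | fuel + 1, node :: rest, comp =>
    if PySem.Set.contains comp node then
      pvLoopA neighbors exclude_edge fuel rest comp
    else
      let comp' := PySem.Set.add comp node
      let pushed := (pvAdj neighbors node).filter
        (fun nbr => !PySem.Set.contains comp' nbr && !pvExcl exclude_edge node nbr)
      pvLoopA neighbors exclude_edge fuel (pushed ++ rest) comp'

def connected_component_containing_py (neighbors : List (String × List String)) (start : String) (exclude_edge : Option (String × String)) : List String :=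
  PySem.List.sorted
    (pvLoopA neighbors exclude_edge (pvFuel neighbors) [start] PySem.Set.empty)
    (fun x => x)

-- ===== PORT B =====
-- inner 'for nbr in neighbors.get(node, set())' of B: add unvisited, non-excluded neighbors
def pvNextInner (neighbors : List (String × List String)) (exclude_edge : Option (String × String))
    (comp' : PySem.Set String) (node : String) (acc : PySem.Set String) : PySem.Set String :=
  (pvAdj neighbors node).foldl
    (fun a nbr =>
      if !PySem.Set.contains comp' nbr && !pvExcl exclude_edge node nbr then PySem.Set.add a nbr
      else a)
    acc

-- B's 'for node in frontier' building next_frontier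
def pvNext (neighbors : List (String × List String)) (exclude_edge : Option (String × String))
    (comp' frontier : PySem.Set String) : PySem.Set String :=
  frontier.foldl (fun acc node => pvNextInner neighbors exclude_edge comp' node acc) PySem.Set.empty

-- B's while loop: component |= frontier, then advance to the next layer
def pvLoopB (neighbors : List (String × List String)) (exclude_edge : Option (String × String)) :
    Nat → PySem.Set String → PySem.Set String → PySem.Set String
  | 0, _, comp => comp
  | fuel + 1, frontier, comp =>
    if frontier.isEmpty then comp
    else
      let comp' := PySem.Set.union comp frontier
      pvLoopB neighbors exclude_edge fuel (pvNext neighbors exclude_edge comp' frontier) comp'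

def connected_component_containing_py_alt (neighbors : List (String × List String)) (start : String) (exclude_edge : Option (String × String)) : List String :=
  PySem.List.sorted
    (pvLoopB neighbors exclude_edge (pvFuel neighbors + 1)
      (PySem.Set.add PySem.Set.empty start) PySem.Set.empty)
    (fun x => x)

-- ===== PRECONDITION & SPEC =====
def Spec_connected_component_containing_py (neighbors : List (String × List String)) (start : String) (exclude_edge : Option (String × String)) (out : List String) : Prop := out = connected_component_containing_py_alt neighbors start exclude_edge
instance (neighbors : List (String × List String)) (start : String) (exclude_edge : Option (String × String)) (out : List String) : Decidable (Spec_connected_component_containing_py neighbors start exclude_edge out) := by unfold Spec_connected_component_containing_py; infer_instance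

-- ===== CLAIM (what is proved, stated in full; the proofs are below) =====
def Claim_equal_connected_component_containing_py : Prop := ∀ (neighbors : List (String × List String)) (start : String) (exclude_edge : Option (String × String)), Dom_connected_component_containing_py neighbors start exclude_edge → Spec_connected_component_containing_py neighbors start exclude_edge (connected_component_containing_py neighbors start exclude_edge)

-- ===== LEMMAS AND PROOFS =====

-- reachability from start along non-excluded edges: the set both loops compute
inductive pvReach (neighbors : List (String × List String)) (exclude_edge : Option (String × String)) (start : String) : String → Prop
  | base : pvReach neighbors exclude_edge start start
  | step {u v : String} : pvReach neighbors exclude_edge start u → v ∈ pvAdj neighbors u →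
      pvExcl exclude_edge u v = false → pvReach neighbors exclude_edge start v

-- remaining-work measure: total adjacency size of unvisited dict keys
def pvSumL (L : List (String × List String)) (comp : PySem.Set String) : Nat :=
  ((L.filter (fun p => !PySem.Set.contains comp p.1)).map (fun p => p.2.length)).sum

def pvS (neighbors : List (String × List String)) (comp : PySem.Set String) : Nat :=
  pvSumL (PySem.Dict.ofList neighbors).items comp

lemma pvSumL_mono (L : List (String × List String)) (comp : PySem.Set String) (node : String) :
    pvSumL L (PySem.Set.add comp node) ≤ pvSumL L comp := by
  apply List.Sublist.sum_le_sum _ (fun b _ => Nat.zero_le b)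
  apply List.Sublist.map
  apply List.monotone_filter_right
  intro a ha
  rcases h : PySem.Set.contains comp a.1 with _ | _
  · simp
  · exfalso
    have hmem : a.1 ∈ PySem.Set.add comp node :=
      (PySem.Set.mem_add _ _ _).mpr (Or.inl ((PySem.Set.contains_iff _ _).mp h))
    rw [(PySem.Set.contains_iff _ _).mpr hmem] at ha
    simp at ha

lemma pvSumL_remove (L : List (String × List String)) (comp : PySem.Set String) (node : String)
    (v : List String) (hmem : (node, v) ∈ L) (hnd : (L.map Prod.fst).Nodup) (hnode : node ∉ comp) :
    pvSumL L (PySem.Set.add comp node) + v.length ≤ pvSumL L comp := by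
  induction L with
  | nil => cases hmem
  | cons p rest ih =>
    simp only [List.map_cons, List.nodup_cons] at hnd
    rcases List.mem_cons.mp hmem with h | h
    · subst h
      have h1 : PySem.Set.contains comp node = false := by
        rcases h : PySem.Set.contains comp node with _ | _
        · rfl
        · exact absurd ((PySem.Set.contains_iff _ _).mp h) hnode
      have h2 : PySem.Set.contains (PySem.Set.add comp node) node = true :=
        (PySem.Set.contains_iff _ _).mpr ((PySem.Set.mem_add _ _ _).mpr (Or.inr rfl))
      rw [pvSumL, pvSumL, List.filter_cons_of_neg (by simp),
        List.filter_cons_of_pos (by simpa using hnode)]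
      simp only [List.map_cons, List.sum_cons]
      have hm := pvSumL_mono rest comp node
      rw [pvSumL, pvSumL] at hm
      omega
    · have hne : p.1 ≠ node := by
        intro he
        exact hnd.1 (he ▸ (List.mem_map.mpr ⟨(node, v), h, rfl⟩))
      have hsame : PySem.Set.contains (PySem.Set.add comp node) p.1 =
          PySem.Set.contains comp p.1 := by
        rcases hcc : PySem.Set.contains comp p.1 with _ | _
        · rcases hca : PySem.Set.contains (PySem.Set.add comp node) p.1 with _ | _
          · rfl
          · rcases (PySem.Set.mem_add _ _ _).mp ((PySem.Set.contains_iff _ _).mp hca) with h' | h'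
            · exact absurd ((PySem.Set.contains_iff _ _).mpr h') (fun hx => by rw [hx] at hcc; cases hcc)
            · exact absurd h' hne

        · exact (PySem.Set.contains_iff _ _).mpr
            ((PySem.Set.mem_add _ _ _).mpr (Or.inl ((PySem.Set.contains_iff _ _).mp hcc)))
      have ihr := ih h hnd.2
      rcases hcc : PySem.Set.contains comp p.1 with _ | _
      · have hpc : p.1 ∉ comp := fun hm => by
          rw [(PySem.Set.contains_iff _ _).mpr hm] at hcc; cases hcc
        rw [pvSumL, pvSumL, List.filter_cons_of_pos (by simp; exact ⟨hpc, hne⟩),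
          List.filter_cons_of_pos (by simpa using hpc)]
        simp only [List.map_cons, List.sum_cons]
        rw [pvSumL, pvSumL] at ihr
        omega
      · have hpcm : p.1 ∈ comp := (PySem.Set.contains_iff _ _).mp hcc
        rw [pvSumL, pvSumL, List.filter_cons_of_neg (by simp [hpcm]),
          List.filter_cons_of_neg (by simp [hpcm])]
        rw [pvSumL, pvSumL] at ihr
        exact ihr

lemma pvS_step (neighbors : List (String × List String)) (comp : PySem.Set String) (node : String)
    (hnode : node ∉ comp) :
    pvS neighbors (PySem.Set.add comp node) + (pvAdj neighbors node).length ≤ pvS neighbors comp := by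
  rcases hc : (PySem.Dict.ofList neighbors).contains node with _ | _
  · have : pvAdj neighbors node = [] := PySem.Dict.getD_of_not_contains _ _ hc
    simpa [this] using pvSumL_mono (PySem.Dict.ofList neighbors).items comp node
  · have hk : node ∈ (PySem.Dict.ofList neighbors).keys :=
      (PySem.Dict.contains_iff_mem_keys _ _).mp hc
    have hk' : node ∈ (PySem.Dict.ofList neighbors).items.map Prod.fst := hk
    rcases List.mem_map.mp hk' with ⟨p, hp, hp1⟩
    have hpv : (node, p.2) ∈ (PySem.Dict.ofList neighbors).items := by
      rcases p with ⟨k, v⟩; cases hp1; exact hp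
    have hget : (PySem.Dict.ofList neighbors).get? node = some p.2 :=
      PySem.Dict.get?_of_mem_items _ hpv (PySem.Dict.nodup_keys_ofList _)
    have hadj : pvAdj neighbors node = p.2 := by
      simp [pvAdj, PySem.Dict.getD_eq_get?_getD, hget]
    rw [hadj]
    exact pvSumL_remove _ comp node p.2 hpv (PySem.Dict.nodup_keys_ofList _) hnode

lemma pvS_empty (neighbors : List (String × List String)) :
    pvS neighbors PySem.Set.empty + 1 = pvFuel neighbors := by
  simp [pvS, pvSumL, pvFuel, PySem.Set.empty, PySem.Set.contains]

lemma pvS_union (neighbors : List (String × List String)) :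
    ∀ (frontier : List String) (comp : PySem.Set String), frontier.Nodup →
      (∀ x ∈ frontier, x ∉ comp) →
      pvS neighbors (PySem.Set.union comp frontier) +
        ((frontier.map (fun u => (pvAdj neighbors u).length)).sum) ≤ pvS neighbors comp := by
  intro frontier
  induction frontier with
  | nil => intro comp _ _; simp [PySem.Set.union]
  | cons u rest ih =>
    intro comp hnd hdisj
    have hu : u ∉ comp := hdisj u (by simp)
    have h1 : PySem.Set.union comp (u :: rest) = PySem.Set.union (PySem.Set.add comp u) rest := rfl
    have h2 := pvS_step neighbors comp u hu
    have h3 := ih (PySem.Set.add comp u) (List.nodup_cons.mp hnd).2 (by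
      intro x hx hmem
      rcases (PySem.Set.mem_add _ _ _).mp hmem with h | h
      · exact hdisj x (List.mem_cons_of_mem _ hx) h
      · exact (List.nodup_cons.mp hnd).1 (h ▸ hx))
    rw [h1]
    simp only [List.map_cons, List.sum_cons]
    omega

-- ---------- A-side loop lemmas ----------

lemma pvLoopA_nodup (neighbors : List (String × List String)) (E : Option (String × String)) :
    ∀ (fuel : Nat) (st : List String) (comp : PySem.Set String),
      comp.Nodup → (pvLoopA neighbors E fuel st comp).Nodup := by
  intro fuel
  induction fuel with
  | zero => intro st comp h; simpa [pvLoopA] using h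
  | succ f ih =>
    intro st comp h
    cases st with
    | nil => simpa [pvLoopA] using h
    | cons node rest =>
      simp only [pvLoopA]
      split
      · exact ih rest comp h
      · exact ih _ _ (PySem.Set.nodup_add _ _ h)

lemma pvLoopA_sound (neighbors : List (String × List String)) (E : Option (String × String))
    (R : String → Prop)
    (hR : ∀ u v, R u → v ∈ pvAdj neighbors u → pvExcl E u v = false → R v) :
    ∀ (fuel : Nat) (st : List String) (comp : PySem.Set String),
      (∀ x ∈ st, R x) → (∀ x ∈ comp, R x) →
      ∀ x ∈ pvLoopA neighbors E fuel st comp, R x := by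
  intro fuel
  induction fuel with
  | zero => intro st comp _ hcomp x hx; exact hcomp x (by simpa [pvLoopA] using hx)
  | succ f ih =>
    intro st comp hst hcomp x hx
    cases st with
    | nil => exact hcomp x (by simpa [pvLoopA] using hx)
    | cons node rest =>
      simp only [pvLoopA] at hx
      split at hx
      · exact ih rest comp (fun y hy => hst y (List.mem_cons_of_mem _ hy)) hcomp x hx
      · refine ih _ _ ?_ ?_ x hx
        · intro y hy
          rcases List.mem_append.mp hy with h | h
          · rcases List.mem_filter.mp h with ⟨hadj, hcond⟩
            have hex : pvExcl E node y = false := by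
              simp only [Bool.and_eq_true, Bool.not_eq_true'] at hcond
              exact hcond.2
            exact hR node y (hst node (by simp)) hadj hex
          · exact hst y (List.mem_cons_of_mem _ h)
        · intro y hy
          rcases (PySem.Set.mem_add _ _ _).mp hy with h | h
          · exact hcomp y h
          · exact h ▸ hst node (by simp)

lemma pvLoopA_complete (neighbors : List (String × List String)) (E : Option (String × String)) :
    ∀ (fuel : Nat) (st : List String) (comp : PySem.Set String),
      st.length + pvS neighbors comp ≤ fuel →
      ∀ x, x ∈ st ∨ x ∈ comp → x ∈ pvLoopA neighbors E fuel st comp := by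
  intro fuel
  induction fuel with
  | zero =>
    intro st comp hf x hx
    have hst : st = [] := List.eq_nil_of_length_eq_zero (by omega)
    subst hst
    rcases hx with h | h
    · cases h
    · simpa [pvLoopA] using h
  | succ f ih =>
    intro st comp hf x hx
    cases st with
    | nil =>
      rcases hx with h | h
      · cases h
      · simpa [pvLoopA] using h
    | cons node rest =>
      simp only [pvLoopA]
      split
      · rename_i hin
        have hnode : node ∈ comp := (PySem.Set.contains_iff _ _).mp hin
        refine ih rest comp (by simp only [List.length_cons] at hf; omega) x ?_
        rcases hx with h | h
        · rcases List.mem_cons.mp h with h' | h'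
          · exact Or.inr (h' ▸ hnode)
          · exact Or.inl h'
        · exact Or.inr h
      · rename_i hin
        have hnode : node ∉ comp := by
          intro h
          exact absurd ((PySem.Set.contains_iff _ _).mpr h) hin
        have hstep := pvS_step neighbors comp node hnode
        have hlen : ((pvAdj neighbors node).filter
            (fun nbr => !PySem.Set.contains (PySem.Set.add comp node) nbr &&
              !pvExcl E node nbr)).length ≤ (pvAdj neighbors node).length :=
          List.length_filter_le _ _
        refine ih _ _ (by
          rw [List.length_append]
          simp only [List.length_cons] at hf
          omega) x ?_
        rcases hx with h | h
        · rcases List.mem_cons.mp h with h' | h'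
          · exact Or.inr ((PySem.Set.mem_add _ _ _).mpr (Or.inr h'))
          · exact Or.inl (List.mem_append.mpr (Or.inr h'))
        · exact Or.inr ((PySem.Set.mem_add _ _ _).mpr (Or.inl h))

lemma pvLoopA_closed (neighbors : List (String × List String)) (E : Option (String × String)) :
    ∀ (fuel : Nat) (st : List String) (comp : PySem.Set String),
      st.length + pvS neighbors comp ≤ fuel →
      (∀ u ∈ comp, ∀ v, v ∈ pvAdj neighbors u → pvExcl E u v = false → v ∈ comp ∨ v ∈ st) →
      ∀ u ∈ pvLoopA neighbors E fuel st comp, ∀ v, v ∈ pvAdj neighbors u →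
        pvExcl E u v = false → v ∈ pvLoopA neighbors E fuel st comp := by
  intro fuel
  induction fuel with
  | zero =>
    intro st comp hf hinv u hu v hadj hex
    have hst : st = [] := List.eq_nil_of_length_eq_zero (by omega)
    subst hst
    simp only [pvLoopA] at hu ⊢
    rcases hinv u hu v hadj hex with h | h
    · exact h
    · cases h
  | succ f ih =>
    intro st comp hf hinv u hu v hadj hex
    cases st with
    | nil =>
      simp only [pvLoopA] at hu ⊢
      rcases hinv u hu v hadj hex with h | h
      · exact h
      · cases h
    | cons node rest =>
      simp only [pvLoopA] at hu ⊢
      split at hu <;> rename_i hin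
      · rw [if_pos hin] at *
        have hnode : node ∈ comp := (PySem.Set.contains_iff _ _).mp hin
        refine ih rest comp (by simp only [List.length_cons] at hf; omega) ?_ u hu v hadj hex
        intro w hw z hz hze
        rcases hinv w hw z hz hze with h | h
        · exact Or.inl h
        · rcases List.mem_cons.mp h with h' | h'
          · exact Or.inl (h' ▸ hnode)
          · exact Or.inr h'
      · rw [if_neg hin] at *
        have hnode : node ∉ comp := by
          intro h
          exact absurd ((PySem.Set.contains_iff _ _).mpr h) hin
        have hstep := pvS_step neighbors comp node hnode
        have hlen : ((pvAdj neighbors node).filter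
            (fun nbr => !PySem.Set.contains (PySem.Set.add comp node) nbr &&
              !pvExcl E node nbr)).length ≤ (pvAdj neighbors node).length :=
          List.length_filter_le _ _
        refine ih _ _ (by
          rw [List.length_append]
          simp only [List.length_cons] at hf
          omega) ?_ u hu v hadj hex
        intro w hw z hz hze
        rcases (PySem.Set.mem_add _ _ _).mp hw with h | h
        · rcases hinv w h z hz hze with h' | h'
          · exact Or.inl ((PySem.Set.mem_add _ _ _).mpr (Or.inl h'))
          · rcases List.mem_cons.mp h' with h'' | h''
            · exact Or.inl ((PySem.Set.mem_add _ _ _).mpr (Or.inr h''))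
            · exact Or.inr (List.mem_append.mpr (Or.inr h''))
        · subst h
          by_cases hzc : z ∈ PySem.Set.add comp w
          · exact Or.inl hzc
          · refine Or.inr (List.mem_append.mpr (Or.inl ?_))
            refine List.mem_filter.mpr ⟨hz, ?_⟩
            have h1 : z ∉ comp := fun hm => hzc ((PySem.Set.mem_add _ _ _).mpr (Or.inl hm))
            have h2 : ¬z = w := fun he => hzc ((PySem.Set.mem_add _ _ _).mpr (Or.inr he))
            simp [hze]
            exact ⟨h1, h2⟩

lemma pvLoopA_mem_iff (neighbors : List (String × List String)) (E : Option (String × String))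
    (start : String) (x : String) :
    x ∈ pvLoopA neighbors E (pvFuel neighbors) [start] PySem.Set.empty ↔
      pvReach neighbors E start x := by
  have hfuel : ([start] : List String).length + pvS neighbors PySem.Set.empty ≤ pvFuel neighbors := by
    have := pvS_empty neighbors
    simp only [List.length_cons, List.length_nil]
    omega
  constructor
  · intro hx
    refine pvLoopA_sound neighbors E (pvReach neighbors E start)
      (fun u v hu hadj hex => pvReach.step hu hadj hex) _ [start] PySem.Set.empty ?_ ?_ x hx
    · intro y hy
      rcases List.mem_cons.mp hy with h | h
      · exact h ▸ pvReach.base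
      · cases h
    · intro y hy; cases hy
  · intro hr
    induction hr with
    | base => exact pvLoopA_complete neighbors E _ _ _ hfuel start (Or.inl (by simp))
    | step hu hadj hex ihu =>
      exact pvLoopA_closed neighbors E _ _ _ hfuel (fun w hw => by cases hw) _ ihu _ hadj hex

-- ---------- B-side loop lemmas ----------

lemma pvNextInner_mem (neighbors : List (String × List String)) (E : Option (String × String))
    (comp' : PySem.Set String) (node : String) :
    ∀ (l : List String) (acc : PySem.Set String) (x : String),
      x ∈ l.foldl (fun a nbr =>
          if !PySem.Set.contains comp' nbr && !pvExcl E node nbr then PySem.Set.add a nbr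
          else a) acc ↔
        x ∈ acc ∨ (x ∈ l ∧ PySem.Set.contains comp' x = false ∧ pvExcl E node x = false) := by
  intro l
  induction l with
  | nil => intro acc x; simp
  | cons nbr rest ih =>
    intro acc x
    simp only [List.foldl_cons]
    by_cases hc : (!PySem.Set.contains comp' nbr && !pvExcl E node nbr) = true
    · rw [if_pos hc]
      rw [ih]
      simp only [Bool.and_eq_true, Bool.not_eq_true'] at hc
      constructor
      · rintro (h | h)
        · rcases (PySem.Set.mem_add _ _ _).mp h with h' | h'
          · exact Or.inl h'
          · subst h'
            exact Or.inr ⟨by simp, hc.1, hc.2⟩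
        · exact Or.inr ⟨List.mem_cons_of_mem _ h.1, h.2⟩
      · rintro (h | ⟨hmem, hcx, hex⟩)
        · exact Or.inl ((PySem.Set.mem_add _ _ _).mpr (Or.inl h))
        · rcases List.mem_cons.mp hmem with h' | h'
          · exact Or.inl ((PySem.Set.mem_add _ _ _).mpr (Or.inr h'))
          · exact Or.inr ⟨h', hcx, hex⟩
    · rw [if_neg hc]
      rw [ih]
      constructor
      · rintro (h | h)
        · exact Or.inl h
        · exact Or.inr ⟨List.mem_cons_of_mem _ h.1, h.2⟩
      · rintro (h | ⟨hmem, hcx, hex⟩)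
        · exact Or.inl h
        · rcases List.mem_cons.mp hmem with h' | h'
          · subst h'
            exact absurd (by rw [hcx, hex]; rfl) hc
          · exact Or.inr ⟨h', hcx, hex⟩

lemma pvNextInner_nodup (neighbors : List (String × List String)) (E : Option (String × String))
    (comp' : PySem.Set String) (node : String) :
    ∀ (l : List String) (acc : PySem.Set String), acc.Nodup →
      (l.foldl (fun a nbr =>
          if !PySem.Set.contains comp' nbr && !pvExcl E node nbr then PySem.Set.add a nbr
          else a) acc).Nodup := by
  intro l
  induction l with
  | nil => intro acc h; simpa using h
  | cons nbr rest ih =>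
    intro acc h
    simp only [List.foldl_cons]
    split
    · exact ih _ (PySem.Set.nodup_add _ _ h)
    · exact ih _ h

lemma pvNextInner_len (neighbors : List (String × List String)) (E : Option (String × String))
    (comp' : PySem.Set String) (node : String) :
    ∀ (l : List String) (acc : PySem.Set String),
      (l.foldl (fun a nbr =>
          if !PySem.Set.contains comp' nbr && !pvExcl E node nbr then PySem.Set.add a nbr
          else a) acc).length ≤ acc.length + l.length := by
  intro l
  induction l with
  | nil => intro acc; simp
  | cons nbr rest ih =>
    intro acc
    simp only [List.foldl_cons, List.length_cons]
    split
    · have h1 := ih (PySem.Set.add acc nbr)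
      have h2 : (PySem.Set.add acc nbr).length ≤ acc.length + 1 := by
        rw [PySem.Set.add_eq_ite]
        split <;> simp
      omega
    · have := ih acc
      omega

lemma pvNext_mem_aux (neighbors : List (String × List String)) (E : Option (String × String))
    (comp' : PySem.Set String) :
    ∀ (frontier : List String) (acc : PySem.Set String) (x : String),
      x ∈ frontier.foldl (fun acc node => pvNextInner neighbors E comp' node acc) acc ↔
        x ∈ acc ∨ ∃ u ∈ frontier, x ∈ pvAdj neighbors u ∧
          PySem.Set.contains comp' x = false ∧ pvExcl E u x = false := by
  intro frontier
  induction frontier with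
  | nil => intro acc x; simp
  | cons u rest ih =>
    intro acc x
    simp only [List.foldl_cons]
    rw [ih]
    unfold pvNextInner
    rw [pvNextInner_mem neighbors E comp' u]
    constructor
    · rintro ((h | h) | ⟨w, hw, h⟩)
      · exact Or.inl h
      · exact Or.inr ⟨u, by simp, h.1, h.2⟩
      · exact Or.inr ⟨w, List.mem_cons_of_mem _ hw, h⟩
    · rintro (h | ⟨w, hw, h⟩)
      · exact Or.inl (Or.inl h)
      · rcases List.mem_cons.mp hw with h' | h'
        · subst h'
          exact Or.inl (Or.inr ⟨h.1, h.2.1, h.2.2⟩)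
        · exact Or.inr ⟨w, h', h⟩

lemma pvNext_mem (neighbors : List (String × List String)) (E : Option (String × String))
    (comp' frontier : PySem.Set String) (x : String) :
    x ∈ pvNext neighbors E comp' frontier ↔
      ∃ u ∈ frontier, x ∈ pvAdj neighbors u ∧
        PySem.Set.contains comp' x = false ∧ pvExcl E u x = false := by
  unfold pvNext
  rw [pvNext_mem_aux]
  simp [PySem.Set.empty]

lemma pvNext_nodup (neighbors : List (String × List String)) (E : Option (String × String))
    (comp' frontier : PySem.Set String) : (pvNext neighbors E comp' frontier).Nodup := by
  unfold pvNext
  have : ∀ (l : List String) (acc : PySem.Set String), acc.Nodup →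
      (l.foldl (fun acc node => pvNextInner neighbors E comp' node acc) acc).Nodup := by
    intro l
    induction l with
    | nil => intro acc h; simpa using h
    | cons u rest ih =>
      intro acc h
      simp only [List.foldl_cons]
      exact ih _ (pvNextInner_nodup neighbors E comp' u _ _ h)
  exact this frontier PySem.Set.empty List.nodup_nil

lemma pvNext_len (neighbors : List (String × List String)) (E : Option (String × String))
    (comp' : PySem.Set String) :
    ∀ (frontier : List String) (acc : PySem.Set String),
      (frontier.foldl (fun acc node => pvNextInner neighbors E comp' node acc) acc).length ≤
        acc.length + (frontier.map (fun u => (pvAdj neighbors u).length)).sum := by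
  intro frontier
  induction frontier with
  | nil => intro acc; simp
  | cons u rest ih =>
    intro acc
    simp only [List.foldl_cons, List.map_cons, List.sum_cons]
    have h1 := ih (pvNextInner neighbors E comp' u acc)
    have h2 : (pvNextInner neighbors E comp' u acc).length ≤
        acc.length + (pvAdj neighbors u).length :=
      pvNextInner_len neighbors E comp' u (pvAdj neighbors u) acc
    omega

lemma pvLoopB_nodup (neighbors : List (String × List String)) (E : Option (String × String)) :
    ∀ (fuel : Nat) (frontier comp : PySem.Set String),
      comp.Nodup → (pvLoopB neighbors E fuel frontier comp).Nodup := by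
  intro fuel
  induction fuel with
  | zero => intro frontier comp h; simpa [pvLoopB] using h
  | succ f ih =>
    intro frontier comp h
    simp only [pvLoopB]
    split
    · exact h
    · exact ih _ _ (PySem.Set.nodup_union _ _ h)

lemma pvLoopB_sound (neighbors : List (String × List String)) (E : Option (String × String))
    (R : String → Prop)
    (hR : ∀ u v, R u → v ∈ pvAdj neighbors u → pvExcl E u v = false → R v) :
    ∀ (fuel : Nat) (frontier comp : PySem.Set String),
      (∀ x ∈ frontier, R x) → (∀ x ∈ comp, R x) →
      ∀ x ∈ pvLoopB neighbors E fuel frontier comp, R x := by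
  intro fuel
  induction fuel with
  | zero => intro frontier comp _ hcomp x hx; exact hcomp x (by simpa [pvLoopB] using hx)
  | succ f ih =>
    intro frontier comp hfr hcomp x hx
    simp only [pvLoopB] at hx
    split at hx
    · exact hcomp x hx
    · refine ih _ _ ?_ ?_ x hx
      · intro y hy
        rcases (pvNext_mem neighbors E _ _ y).mp hy with ⟨u, hu, hadj, _, hex⟩
        exact hR u y (hfr u hu) hadj hex
      · intro y hy
        rcases (PySem.Set.mem_union _ _ _).mp hy with h | h
        · exact hcomp y h
        · exact hfr y h

lemma pvLoopB_complete (neighbors : List (String × List String)) (E : Option (String × String)) :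
    ∀ (fuel : Nat) (frontier comp : PySem.Set String),
      1 + frontier.length + pvS neighbors comp ≤ fuel → frontier.Nodup →
      (∀ x ∈ frontier, x ∉ comp) →
      ∀ x, x ∈ frontier ∨ x ∈ comp → x ∈ pvLoopB neighbors E fuel frontier comp := by
  intro fuel
  induction fuel with
  | zero => intro frontier comp hf _ _ x _; omega
  | succ f ih =>
    intro frontier comp hf hnd hdisj x hx
    simp only [pvLoopB]
    split
    · rename_i hemp
      have : frontier = [] := List.isEmpty_iff.mp hemp
      subst this
      rcases hx with h | h
      · cases h
      · exact h
    · rename_i hemp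
      have hfr_ne : frontier ≠ [] := fun h => hemp (by simp [h])
      have hcomp' : ∀ y, y ∈ PySem.Set.union comp frontier ↔ y ∈ comp ∨ y ∈ frontier :=
        fun y => PySem.Set.mem_union _ _ _
      have hnext_disj : ∀ y ∈ pvNext neighbors E (PySem.Set.union comp frontier) frontier,
          y ∉ PySem.Set.union comp frontier := by
        intro y hy hmem
        rcases (pvNext_mem neighbors E _ _ y).mp hy with ⟨u, _, _, hc, _⟩
        rw [(PySem.Set.contains_iff _ _).mpr hmem] at hc
        cases hc
      have hlen : (pvNext neighbors E (PySem.Set.union comp frontier) frontier).length ≤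
          (frontier.map (fun u => (pvAdj neighbors u).length)).sum := by
        have := pvNext_len neighbors E (PySem.Set.union comp frontier) frontier PySem.Set.empty
        simpa [PySem.Set.empty] using this
      have hsum := pvS_union neighbors frontier comp hnd hdisj
      have hfl : 1 ≤ frontier.length := by
        cases frontier with
        | nil => exact absurd rfl hfr_ne
        | cons a l => simp
      refine ih _ _ (by omega) (pvNext_nodup neighbors E _ _) hnext_disj x ?_
      exact Or.inr ((hcomp' x).mpr (by tauto))

lemma pvLoopB_closed (neighbors : List (String × List String)) (E : Option (String × String)) :
    ∀ (fuel : Nat) (frontier comp : PySem.Set String),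
      1 + frontier.length + pvS neighbors comp ≤ fuel → frontier.Nodup →
      (∀ x ∈ frontier, x ∉ comp) →
      (∀ u ∈ comp, ∀ v, v ∈ pvAdj neighbors u → pvExcl E u v = false →
        v ∈ comp ∨ v ∈ frontier) →
      ∀ u ∈ pvLoopB neighbors E fuel frontier comp, ∀ v, v ∈ pvAdj neighbors u →
        pvExcl E u v = false → v ∈ pvLoopB neighbors E fuel frontier comp := by
  intro fuel
  induction fuel with
  | zero => intro frontier comp hf _ _ _ u _ v _ _; omega
  | succ f ih =>
    intro frontier comp hf hnd hdisj hinv u hu v hadj hex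
    simp only [pvLoopB] at hu ⊢
    split at hu <;> rename_i hemp
    · rw [if_pos hemp] at *
      have : frontier = [] := List.isEmpty_iff.mp hemp
      subst this
      rcases hinv u hu v hadj hex with h | h
      · exact h
      · cases h
    · rw [if_neg hemp] at *
      have hfr_ne : frontier ≠ [] := fun h => hemp (by simp [h])
      have hnext_disj : ∀ y ∈ pvNext neighbors E (PySem.Set.union comp frontier) frontier,
          y ∉ PySem.Set.union comp frontier := by
        intro y hy hmem
        rcases (pvNext_mem neighbors E _ _ y).mp hy with ⟨w, _, _, hc, _⟩
        rw [(PySem.Set.contains_iff _ _).mpr hmem] at hc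
        cases hc
      have hlen : (pvNext neighbors E (PySem.Set.union comp frontier) frontier).length ≤
          (frontier.map (fun u => (pvAdj neighbors u).length)).sum := by
        have := pvNext_len neighbors E (PySem.Set.union comp frontier) frontier PySem.Set.empty
        simpa [PySem.Set.empty] using this
      have hsum := pvS_union neighbors frontier comp hnd hdisj
      have hfl : 1 ≤ frontier.length := by
        cases frontier with
        | nil => exact absurd rfl hfr_ne
        | cons a l => simp
      refine ih _ _ (by omega) (pvNext_nodup neighbors E _ _) hnext_disj ?_ u hu v hadj hex
      intro w hw z hz hze
      rcases (PySem.Set.mem_union _ _ _).mp hw with h | h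
      · rcases hinv w h z hz hze with h' | h'
        · exact Or.inl ((PySem.Set.mem_union _ _ _).mpr (Or.inl h'))
        · exact Or.inl ((PySem.Set.mem_union _ _ _).mpr (Or.inr h'))
      · by_cases hzc : z ∈ PySem.Set.union comp frontier
        · exact Or.inl hzc
        · refine Or.inr ((pvNext_mem neighbors E _ _ z).mpr ⟨w, h, hz, ?_, hze⟩)
          rcases hc : PySem.Set.contains (PySem.Set.union comp frontier) z with _ | _
          · rfl
          · exact absurd ((PySem.Set.contains_iff _ _).mp hc) hzc

lemma pvLoopB_mem_iff (neighbors : List (String × List String)) (E : Option (String × String))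
    (start : String) (x : String) :
    x ∈ pvLoopB neighbors E (pvFuel neighbors + 1) (PySem.Set.add PySem.Set.empty start)
        PySem.Set.empty ↔ pvReach neighbors E start x := by
  have hfr : PySem.Set.add (PySem.Set.empty : PySem.Set String) start = [start] := rfl
  have hfuel : 1 + ([start] : List String).length + pvS neighbors PySem.Set.empty ≤
      pvFuel neighbors + 1 := by
    have := pvS_empty neighbors
    simp only [List.length_cons, List.length_nil]
    omega
  rw [hfr]
  constructor
  · intro hx
    refine pvLoopB_sound neighbors E (pvReach neighbors E start)
      (fun u v hu hadj hex => pvReach.step hu hadj hex) _ [start] PySem.Set.empty ?_ ?_ x hx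
    · intro y hy
      rcases List.mem_cons.mp hy with h | h
      · exact h ▸ pvReach.base
      · cases h
    · intro y hy; cases hy
  · intro hr
    induction hr with
    | base =>
      exact pvLoopB_complete neighbors E _ [start] PySem.Set.empty hfuel (by simp)
        (fun y _ hy => by cases hy) start (Or.inl (by simp))
    | step hu hadj hex ihu =>
      exact pvLoopB_closed neighbors E _ [start] PySem.Set.empty hfuel (by simp)
        (fun y _ hy => by cases hy) (fun w hw => by cases hw) _ ihu _ hadj hex

-- ===== VERDICT (by name: the statement is the Claim_ definition above) =====
theorem connected_component_containing_py_spec : Claim_equal_connected_component_containing_py := by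
  intro neighbors start exclude_edge _
  unfold Spec_connected_component_containing_py
  unfold connected_component_containing_py connected_component_containing_py_alt
  apply PySem.List.sorted_eq_sorted_of_perm _ _ _ (fun a b h => h)
  refine (List.perm_ext_iff_of_nodup ?_ ?_).mpr ?_
  · exact pvLoopA_nodup neighbors exclude_edge _ _ _ List.nodup_nil
  · exact pvLoopB_nodup neighbors exclude_edge _ _ _ List.nodup_nil
  · intro a
    rw [pvLoopA_mem_iff, pvLoopB_mem_iff]
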